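-- pv_equiv track=rewrite | github.com/luckythemonster/sprites-and-tilesets | analyze_assets.py | categorize_asset
-- ===== SOURCE A (Python) =====
-- def categorize_asset(filename):
--     """Predict category based on filename"""
--     name_lower = filename.lower()
--
--     # Tileset categories
--     if any(word in name_lower for word in ['tileset', 'tile', 'map', 'terrain']):
--         if any(word in name_lower for word in ['cyb', 'cyber', 'punk', 'neon']):
--             return 'tilesets/cyberpunk'
--         elif any(word in name_lower for word in ['scifi', 'sci-fi', 'space', 'station', 'facility']):
--             return 'tilesets/sci-fi'
--         elif any(word in name_lower for word in ['dungeon', 'cave', 'dark', 'tech']):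
--             return 'tilesets/dungeons'
--         elif any(word in name_lower for word in ['city', 'urban', 'building', 'town']):
--             return 'tilesets/city'
--         elif any(word in name_lower for word in ['topdown', 'top-down', '2d', 'top']):
--             return 'tilesets/topdown'
--         elif any(word in name_lower for word in ['cursed', 'land', 'nature', 'forest']):
--             return 'tilesets/fantasy'
--         else:
--             return 'tilesets/misc'
--
--     # Character/Sprite categories
--     elif any(word in name_lower for word in ['character', 'sprite', 'avatar', 'player', 'npc']):
--         if any(word in name_lower for word in ['cyb', 'cyber', 'punk']):
--             return 'sprites/cyberpunk'
--         else:
--             return 'sprites/characters'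
--
--     # Environment
--     elif any(word in name_lower for word in ['environment', 'prop', 'object', 'item']):
--         return 'sprites/environment'
--
--     # Interior
--     elif any(word in name_lower for word in ['interior', 'room', 'furniture', 'inside', 'indoor']):
--         return 'interiors'
--
--     # UI
--     elif any(word in name_lower for word in ['ui', 'hud', 'button', 'menu', 'interface']):
--         return 'ui'
--
--     # Effects
--     elif any(word in name_lower for word in ['effect', 'particle', 'animation', 'magic']):
--         return 'effects'
--
--     else:
--         return 'props'
-- ===== SOURCE B (Python) =====
-- # B: flat keyword->rank scoring table with a running-minimum pass, instead of an
-- # ordered if/elif cascade of any() checks; the best (lowest) rank indexes an output list.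
--
-- def _flat(groups):
--     return [(kw, r) for r, kws in enumerate(groups) for kw in kws]
--
-- _TOP = _flat([
--     ['tileset', 'tile', 'map', 'terrain'],
--     ['character', 'sprite', 'avatar', 'player', 'npc'],
--     ['environment', 'prop', 'object', 'item'],
--     ['interior', 'room', 'furniture', 'inside', 'indoor'],
--     ['ui', 'hud', 'button', 'menu', 'interface'],
--     ['effect', 'particle', 'animation', 'magic'],
-- ])
--
-- _TSUB = _flat([
--     ['cyb', 'cyber', 'punk', 'neon'],
--     ['scifi', 'sci-fi', 'space', 'station', 'facility'],
--     ['dungeon', 'cave', 'dark', 'tech'],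
--     ['city', 'urban', 'building', 'town'],
--     ['topdown', 'top-down', '2d', 'top'],
--     ['cursed', 'land', 'nature', 'forest'],
-- ])
--
-- _CSUB = _flat([['cyb', 'cyber', 'punk']])
--
-- _TOUT = ['tilesets/cyberpunk', 'tilesets/sci-fi', 'tilesets/dungeons',
--          'tilesets/city', 'tilesets/topdown', 'tilesets/fantasy', 'tilesets/misc']
--
-- _OUT = ['sprites/environment', 'interiors', 'ui', 'effects', 'props']
--
--
-- def _best(name, table, default):
--     """Lowest rank among matching keywords (running minimum over the whole table)."""
--     best = default
--     for kw, r in table: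
--         if r < best and kw in name:
--             best = r
--     return best
--
--
-- def categorize_asset(filename):
--     """Predict category based on filename"""
--     name = filename.lower()
--     g = _best(name, _TOP, 6)
--     if g == 0:
--         return _TOUT[_best(name, _TSUB, 6)]
--     if g == 1:
--         return 'sprites/cyberpunk' if _best(name, _CSUB, 1) == 0 else 'sprites/characters'
--     return _OUT[g - 2]
-- ===== Notes on version B (the rewrite author's own statement) =====
-- stated objective: alternative
-- what changed: Replaces the if/elif cascade of per-group any() checks by a flat keyword->rank scoring table scanned once with a running minimum, whose best rank then indexes an output list (nested tileset/character resolution done the same way).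
import Mathlib
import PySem

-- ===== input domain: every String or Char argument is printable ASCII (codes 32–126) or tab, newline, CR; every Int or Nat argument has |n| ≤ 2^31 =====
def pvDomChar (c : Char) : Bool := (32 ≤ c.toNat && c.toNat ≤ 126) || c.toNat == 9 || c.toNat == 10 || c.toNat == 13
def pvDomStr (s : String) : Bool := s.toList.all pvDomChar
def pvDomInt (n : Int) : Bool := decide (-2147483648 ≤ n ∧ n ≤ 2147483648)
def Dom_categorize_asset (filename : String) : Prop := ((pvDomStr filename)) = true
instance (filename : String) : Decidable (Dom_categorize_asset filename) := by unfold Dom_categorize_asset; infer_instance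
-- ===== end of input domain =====

-- B replaces A's if/elif cascade of any() checks by a flat keyword→rank table scanned
-- with a running minimum, the best rank indexing an output list (objective: alternative).

-- ===== PORT A =====
-- any(word in name_lower for word in ws)
def pvAnyIn (nl : String) (ws : List String) : Bool := ws.any (fun w => PySem.Str.isIn w nl)

def categorize_asset (filename : String) : String :=
  let name_lower := PySem.Str.lower filename
  if pvAnyIn name_lower ["tileset", "tile", "map", "terrain"] then
    if pvAnyIn name_lower ["cyb", "cyber", "punk", "neon"] then "tilesets/cyberpunk"
    else if pvAnyIn name_lower ["scifi", "sci-fi", "space", "station", "facility"] then "tilesets/sci-fi"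
    else if pvAnyIn name_lower ["dungeon", "cave", "dark", "tech"] then "tilesets/dungeons"
    else if pvAnyIn name_lower ["city", "urban", "building", "town"] then "tilesets/city"
    else if pvAnyIn name_lower ["topdown", "top-down", "2d", "top"] then "tilesets/topdown"
    else if pvAnyIn name_lower ["cursed", "land", "nature", "forest"] then "tilesets/fantasy"
    else "tilesets/misc"
  else if pvAnyIn name_lower ["character", "sprite", "avatar", "player", "npc"] then
    if pvAnyIn name_lower ["cyb", "cyber", "punk"] then "sprites/cyberpunk"
    else "sprites/characters"
  else if pvAnyIn name_lower ["environment", "prop", "object", "item"] then "sprites/environment"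
  else if pvAnyIn name_lower ["interior", "room", "furniture", "inside", "indoor"] then "interiors"
  else if pvAnyIn name_lower ["ui", "hud", "button", "menu", "interface"] then "ui"
  else if pvAnyIn name_lower ["effect", "particle", "animation", "magic"] then "effects"
  else "props"

-- ===== PORT B =====
-- _flat(groups): [(kw, r) for r, kws in enumerate(groups) for kw in kws]
def pvFlat (groups : List (List String)) : List (String × Nat) :=
  (List.zipIdx groups).flatMap (fun p => p.1.map (fun kw => (kw, p.2)))

def pvTopGroups : List (List String) :=
  [ ["tileset", "tile", "map", "terrain"],
    ["character", "sprite", "avatar", "player", "npc"],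
    ["environment", "prop", "object", "item"],
    ["interior", "room", "furniture", "inside", "indoor"],
    ["ui", "hud", "button", "menu", "interface"],
    ["effect", "particle", "animation", "magic"] ]

def pvTsubGroups : List (List String) :=
  [ ["cyb", "cyber", "punk", "neon"],
    ["scifi", "sci-fi", "space", "station", "facility"],
    ["dungeon", "cave", "dark", "tech"],
    ["city", "urban", "building", "town"],
    ["topdown", "top-down", "2d", "top"],
    ["cursed", "land", "nature", "forest"] ]

def pvCsubGroups : List (List String) := [["cyb", "cyber", "punk"]]

def pvTout : List String :=
  ["tilesets/cyberpunk", "tilesets/sci-fi", "tilesets/dungeons",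
   "tilesets/city", "tilesets/topdown", "tilesets/fantasy", "tilesets/misc"]

def pvOut : List String := ["sprites/environment", "interiors", "ui", "effects", "props"]

-- _best: running minimum rank over the flat table
def pvBest (name : String) : List (String × Nat) → Nat → Nat
  | [], best => best
  | (kw, r) :: rest, best =>
      pvBest name rest (if decide (r < best) && PySem.Str.isIn kw name then r else best)

def categorize_asset_alt (filename : String) : String :=
  let name := PySem.Str.lower filename
  let g := pvBest name (pvFlat pvTopGroups) 6
  if g = 0 then (PySem.List.pyGet? pvTout ((pvBest name (pvFlat pvTsubGroups) 6 : Nat) : Int)).getD ""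
  else if g = 1 then
    if pvBest name (pvFlat pvCsubGroups) 1 = 0 then "sprites/cyberpunk" else "sprites/characters"
  else (PySem.List.pyGet? pvOut (((g : Int)) - 2)).getD ""

-- ===== PRECONDITION & SPEC =====
def Spec_categorize_asset (filename : String) (out : String) : Prop := out = categorize_asset_alt filename
instance (filename : String) (out : String) : Decidable (Spec_categorize_asset filename out) := by unfold Spec_categorize_asset; infer_instance

-- ===== CLAIM (what is proved, stated in full; the proofs are below) =====
def Claim_equal_categorize_asset : Prop := ∀ (filename : String), Dom_categorize_asset filename → Spec_categorize_asset filename (categorize_asset filename)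

-- ===== LEMMAS AND PROOFS =====

-- the first-match cascade that pvBest's running minimum computes (proof-only helper)
def pvCascade (name : String) : Nat → List (List String) → Nat → Nat
  | _, [], d => d
  | k, g :: gs, d =>
      if g.any (fun w => PySem.Str.isIn w name) then k else pvCascade name (k + 1) gs d

-- folding one constant-rank keyword group through the running minimum
theorem pvBest_const (name : String) (ws : List String) (r b : Nat) (rest : List (String × Nat)) :
    pvBest name (ws.map (fun kw => (kw, r)) ++ rest) b
      = pvBest name rest (if decide (r < b) && ws.any (fun w => PySem.Str.isIn w name) then r else b) := by
  induction ws generalizing b with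
  | nil => simp
  | cons w ws ih =>
      simp only [List.map_cons, List.cons_append, pvBest, List.any_cons]
      rw [ih]
      congr 1
      by_cases hrb : r < b <;> by_cases hw : PySem.Str.isIn w name = true <;>
        by_cases hany : (ws.any fun w => PySem.Str.isIn w name) = true <;>
        simp_all <;> (intro h; split_ifs at h <;> omega)

theorem pvFlat_rank_ge (gs : List (List String)) (m : Nat) :
    ∀ p ∈ (gs.zipIdx m).flatMap (fun p => p.1.map (fun kw => (kw, p.2))), m ≤ p.2 := by
  induction gs generalizing m with
  | nil => simp
  | cons g gs ih =>
      intro p hp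
      simp only [List.zipIdx_cons, List.flatMap_cons, List.mem_append] at hp
      rcases hp with hp | hp
      · rcases List.mem_map.mp hp with ⟨kw, _, rfl⟩; exact le_refl m
      · exact Nat.le_of_succ_le (ih (m + 1) p hp)

theorem pvBest_of_ge (name : String) (tbl : List (String × Nat)) (b : Nat)
    (h : ∀ p ∈ tbl, b ≤ p.2) : pvBest name tbl b = b := by
  induction tbl with
  | nil => rfl
  | cons p rest ih =>
      obtain ⟨kw, r⟩ := p
      have hr : b ≤ r := h (kw, r) (List.mem_cons_self ..)
      simp only [pvBest]
      rw [if_neg (by simp [Nat.not_lt.mpr hr])]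
      exact ih (fun q hq => h q (List.mem_cons_of_mem _ hq))

-- the running minimum over the flat table equals the first-match cascade
theorem pvBest_flat (name : String) (gs : List (List String)) (k d : Nat)
    (h : k + gs.length ≤ d) :
    pvBest name ((gs.zipIdx k).flatMap (fun p => p.1.map (fun kw => (kw, p.2)))) d
      = pvCascade name k gs d := by
  induction gs generalizing k with
  | nil => simp [pvBest, pvCascade]
  | cons g gs ih =>
      have hk : k < d := by simp only [List.length_cons] at h; omega
      simp only [List.zipIdx_cons, List.flatMap_cons]
      rw [pvBest_const]
      rw [show pvCascade name k (g :: gs) d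
            = if (g.any fun w => PySem.Str.isIn w name) = true then k
              else pvCascade name (k + 1) gs d from rfl]
      by_cases hg : (g.any fun w => PySem.Str.isIn w name) = true
      · rw [if_pos hg, if_pos (by rw [Bool.and_eq_true]; exact ⟨decide_eq_true hk, hg⟩)]
        exact pvBest_of_ge _ _ _ (fun p hp => by
          have := pvFlat_rank_ge gs (k + 1) p hp; omega)
      · rw [if_neg hg, if_neg (fun hc => hg ((Bool.and_eq_true ..).mp hc).2)]
        exact ih (k + 1) (by simp only [List.length_cons] at h ⊢; omega)

-- ===== VERDICT (by name: the statement is the Claim_ definition above) =====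
set_option maxRecDepth 8192 in
set_option maxHeartbeats 2000000 in
theorem categorize_asset_spec : Claim_equal_categorize_asset := by
  intro filename _
  simp only [Spec_categorize_asset, categorize_asset, categorize_asset_alt, pvFlat]
  simp only [pvBest_flat _ pvTopGroups 0 6 (by simp [pvTopGroups]),
    pvBest_flat _ pvTsubGroups 0 6 (by simp [pvTsubGroups]),
    pvBest_flat _ pvCsubGroups 0 1 (by simp [pvCsubGroups])]
  simp only [pvTopGroups, pvTsubGroups, pvCsubGroups]
  simp only [pvCascade, pvAnyIn]
  split_ifs <;> first | rfl | omega | decide | simp_all
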